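-- pv_equiv track=rewrite | github.com/LennyDuan/AlgorithmPython | Amazon | OA 2019 | Substrings of size K with K distinct chars/answer.py | size_k
-- ===== SOURCE A (Python) =====
-- def size_k(s, k):
--     res = []
--     len_s = len(s)
--     for i in range(len_s):
--         sub = s[i:i+k]
--         if i + k > len_s:
--             break
--         if sub not in res and len(set(sub)) is k:
--             res.append(sub)
--     return res
-- ===== SOURCE B (Python) =====
-- def size_k(s, k):
--     # Sliding window: maintain per-char counts and the number of distinct
--     # chars in the current window incrementally; dedup results via a seen set.
--     n = len(s)
--     if k < 0 or k > n:
--         return []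
--     if k == 0:
--         return [''] if n else []
--     cnt = {}
--     distinct = 0
--     for j in range(k):
--         c = s[j]
--         v = cnt.get(c, 0) + 1
--         cnt[c] = v
--         if v == 1:
--             distinct += 1
--     seen = set()
--     res = []
--     for i in range(n - k + 1):
--         if i > 0:
--             o = s[i - 1]
--             v = cnt[o] - 1
--             cnt[o] = v
--             if v == 0:
--                 distinct -= 1
--             c = s[i + k - 1]
--             v = cnt.get(c, 0) + 1
--             cnt[c] = v
--             if v == 1:
--                 distinct += 1
--         if distinct == k:
--             w = s[i:i + k]
--             if w not in seen:
--                 seen.add(w)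
--                 res.append(w)
--     return res
-- ===== Notes on version B (the rewrite author's own statement) =====
-- stated objective: faster
-- what changed: A rebuilds set(sub) for every window and rescans the growing result list for duplicates (and relies on a break inside a full range(len(s)) loop); B slides a window once over the string, maintaining per-character counts and the number of distinct characters incrementally, and deduplicates via a hash set.
import Mathlib
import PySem

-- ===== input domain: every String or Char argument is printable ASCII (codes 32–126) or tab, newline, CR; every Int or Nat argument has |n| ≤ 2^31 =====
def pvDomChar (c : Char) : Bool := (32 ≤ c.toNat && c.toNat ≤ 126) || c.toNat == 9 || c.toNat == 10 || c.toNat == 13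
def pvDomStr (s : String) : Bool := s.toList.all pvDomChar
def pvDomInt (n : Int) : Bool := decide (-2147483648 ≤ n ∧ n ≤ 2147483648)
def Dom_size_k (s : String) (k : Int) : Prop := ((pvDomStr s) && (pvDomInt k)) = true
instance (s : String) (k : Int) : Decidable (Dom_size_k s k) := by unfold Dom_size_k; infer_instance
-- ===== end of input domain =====

-- B replaces A's per-window set build and linear rescan of `res` by a sliding window that
-- maintains per-char counts and the distinct-char number incrementally, deduplicating via a
-- seen set (objective: faster).
-- Note: A's `len(set(sub)) is k` is ported as equality — on the ASCII domain a freshly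
-- computed distinct-char count is a small CPython int (≤ 100, hence interned), so `is`
-- coincides with `==` exactly.

-- ===== PORT A =====
-- the `for i in range(len_s)` loop of A, with `break` = returning `res`
def size_k_go (s : String) (lenS k : Int) : List Int → List String → List String
  | [], res => res
  | i :: rest, res =>
    let sub := PySem.Str.slice s (some i) (some (i + k))
    if i + k > lenS then res
    else if sub ∉ res ∧ ((PySem.Set.len (PySem.Set.ofList sub.toList) : Int) = k) then
      size_k_go s lenS k rest (res ++ [sub])
    else
      size_k_go s lenS k rest res

def size_k (s : String) (k : Int) : List String :=
  let lenS : Int := PySem.Str.len s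
  size_k_go s lenS k (PySem.List.pyRange 0 lenS 1) []

-- ===== PORT B =====
-- the `for j in range(k)` loop of B: build (cnt, distinct) for the first window
def size_k_alt_init (cs : List Char) : List Int → PySem.Dict Char Int × Int → PySem.Dict Char Int × Int
  | [], st => st
  | j :: rest, (cnt, distinct) =>
    let c := PySem.List.pyGetD cs j ' '
    let v := cnt.getD c 0 + 1
    size_k_alt_init cs rest (cnt.insert c v, if v = 1 then distinct + 1 else distinct)

-- the `for i in range(n - k + 1)` loop of B
def size_k_alt_go (s : String) (k : Int) :
    List Int → PySem.Dict Char Int → Int → PySem.Set String → List String → List String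
  | [], _, _, _, res => res
  | i :: rest, cnt, distinct, seen, res =>
    let st :=
      if i > 0 then
        let o := PySem.List.pyGetD s.toList (i - 1) ' '
        let v := cnt.getD o 0 - 1
        let cnt := cnt.insert o v
        let distinct := if v = 0 then distinct - 1 else distinct
        let c := PySem.List.pyGetD s.toList (i + k - 1) ' '
        let v2 := cnt.getD c 0 + 1
        (cnt.insert c v2, if v2 = 1 then distinct + 1 else distinct)
      else (cnt, distinct)
    if st.2 = k then
      let w := PySem.Str.slice s (some i) (some (i + k))
      if w ∈ seen then size_k_alt_go s k rest st.1 st.2 seen res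
      else size_k_alt_go s k rest st.1 st.2 (PySem.Set.add seen w) (res ++ [w])
    else size_k_alt_go s k rest st.1 st.2 seen res

def size_k_alt (s : String) (k : Int) : List String :=
  let n : Int := PySem.Str.len s
  if k < 0 ∨ k > n then []
  else if k = 0 then (if n ≠ 0 then [""] else [])
  else
    let st := size_k_alt_init s.toList (PySem.List.pyRange 0 k 1) (PySem.Dict.empty, 0)
    size_k_alt_go s k (PySem.List.pyRange 0 (n - k + 1) 1) st.1 st.2 PySem.Set.empty []

-- ===== PRECONDITION & SPEC =====
def Spec_size_k (s : String) (k : Int) (out : List String) : Prop := out = size_k_alt s k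
instance (s : String) (k : Int) (out : List String) : Decidable (Spec_size_k s k out) := by unfold Spec_size_k; infer_instance

-- ===== CLAIM (what is proved, stated in full; the proofs are below) =====
def Claim_equal_size_k : Prop := ∀ (s : String) (k : Int), Dom_size_k s k → Spec_size_k s k (size_k s k)

-- ===== LEMMAS AND PROOFS =====

-- the window s[i:i+k] as a drop/take on the character list
def pvWin (cs : List Char) (i k : Nat) : List Char := (cs.drop i).take k

lemma pvSetLen (l : List Char) :
    PySem.Set.len (PySem.Set.ofList l) = (l.toFinset.card : Int) := by
  have h1 : (PySem.Set.ofList l).toFinset = l.toFinset := by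
    ext x; simp [PySem.Set.mem_ofList]
  have h2 := List.toFinset_card_of_nodup (PySem.Set.nodup_ofList l)
  simp [PySem.Set.len, ← h2, h1]

lemma pvSubToList (s : String) (i k : Int) (h0 : 0 ≤ i) (hk : 0 ≤ k) :
    (PySem.Str.slice s (some i) (some (i + k))).toList = pvWin s.toList i.toNat k.toNat := by
  rw [PySem.Str.toList_slice, PySem.Chars.slice_eq_listSlice,
    PySem.List.slice_toNat _ h0 (by omega)]
  unfold pvWin
  congr 1
  omega
lemma pvCardCons (x : Char) (l : List Char) :
    (x :: l).toFinset.card = l.toFinset.card + (if x ∈ l then 0 else 1) := by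
  by_cases h : x ∈ l
  · simp [List.toFinset_cons, Finset.insert_eq_self.2 (List.mem_toFinset.2 h), h]
  · rw [List.toFinset_cons, Finset.card_insert_of_notMem (by simpa using h)]
    simp [h]

lemma pvCardSnoc (l : List Char) (x : Char) :
    (l ++ [x]).toFinset.card = l.toFinset.card + (if x ∈ l then 0 else 1) := by
  rw [List.toFinset_append]
  have : l.toFinset ∪ [x].toFinset = insert x l.toFinset := by
    simp
  rw [this]
  by_cases h : x ∈ l
  · simp [Finset.insert_eq_self.2 (List.mem_toFinset.2 h), h]
  · rw [Finset.card_insert_of_notMem (by simpa using h)]; simp [h]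

lemma pvCountSnoc (l : List Char) (x c : Char) :
    (l ++ [x]).count c = l.count c + (if c = x then 1 else 0) := by
  rw [List.count_append]
  by_cases h : c = x
  · subst h; simp
  · simp [h, Ne.symm h]

lemma pvWinCons (cs : List Char) (j kn : Nat) (h1 : 1 ≤ kn) (h2 : j + kn ≤ cs.length) :
    pvWin cs j kn = cs[j]'(by omega) :: pvWin cs (j + 1) (kn - 1) := by
  unfold pvWin
  cases kn with
  | zero => omega
  | succ m =>
    conv_lhs => rw [List.drop_eq_getElem_cons (show j < cs.length by omega)]
    rw [List.take_succ_cons]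
    simp

lemma pvWinSnoc (cs : List Char) (i kn : Nat) (h1 : 1 ≤ kn) (h2 : i + kn ≤ cs.length) :
    pvWin cs i kn = pvWin cs i (kn - 1) ++ [cs[i + kn - 1]'(by omega)] := by
  unfold pvWin
  obtain ⟨m, rfl⟩ : ∃ m, kn = m + 1 := ⟨kn - 1, by omega⟩
  have hm : m < (cs.drop i).length := by simp; omega
  rw [List.take_add_one, List.getElem?_eq_getElem hm]
  simp [show i + (m + 1) - 1 = i + m from by omega]

lemma pvInit (cs : List Char) : ∀ (m j : Nat) (cnt : PySem.Dict Char Int) (distinct : Int),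
    j + m ≤ cs.length →
    (∀ c, cnt.getD c 0 = ((cs.take j).count c : Int)) →
    distinct = ((cs.take j).toFinset.card : Int) →
    (∀ c, (size_k_alt_init cs (PySem.List.pyRange (j : Int) ((j : Int) + (m : Int)) 1) (cnt, distinct)).1.getD c 0
        = ((cs.take (j + m)).count c : Int))
    ∧ (size_k_alt_init cs (PySem.List.pyRange (j : Int) ((j : Int) + (m : Int)) 1) (cnt, distinct)).2
        = ((cs.take (j + m)).toFinset.card : Int) := by
  intro m
  induction m with
  | zero =>
    intro j cnt distinct hle hc hd
    rw [PySem.List.pyRange_one_eq_nil (by omega)]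
    simpa [size_k_alt_init] using ⟨hc, hd⟩
  | succ m ih =>
    intro j cnt distinct hle hc hd
    rw [PySem.List.pyRange_one_cons (by omega : (j : Int) < (j : Int) + (m + 1 : Nat))]
    simp only [size_k_alt_init]
    have hj : j < cs.length := by omega
    have hgc : PySem.List.pyGetD cs (j : Int) ' ' = cs[j] := by
      rw [PySem.List.pyGetD_eq_getElem cs ' ' (by omega) (by exact_mod_cast hj)]
      simp
    have htake : cs.take (j + 1) = cs.take j ++ [cs[j]] := by
      rw [List.take_add_one, List.getElem?_eq_getElem hj]; simp
    have hcnt' : ∀ c, (cnt.insert cs[j] (cnt.getD cs[j] 0 + 1)).getD c 0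
        = ((cs.take (j + 1)).count c : Int) := by
      intro c
      rw [PySem.Dict.getD_insert, htake, pvCountSnoc, hc c]
      split_ifs with h <;> [subst h; skip] <;> simp [hc] <;> omega
    have hdist' : (if cnt.getD cs[j] 0 + 1 = 1 then distinct + 1 else distinct)
        = ((cs.take (j + 1)).toFinset.card : Int) := by
      rw [htake, pvCardSnoc, hc, hd]
      by_cases hm2 : cs[j] ∈ cs.take j
      · have hp : 0 < (cs.take j).count cs[j] := List.count_pos_iff.2 hm2
        rw [if_neg (by push_cast; omega), if_pos hm2]
        push_cast; omega
      · have hz : (cs.take j).count cs[j] = 0 := by rw [List.count_eq_zero]; exact hm2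
        rw [if_pos (by rw [hz]; norm_num), if_neg hm2]
        push_cast; omega
    have := ih (j + 1) _ _ (by omega) hcnt' hdist'
    have harg : ((j : Int) + 1) = ((j + 1 : Nat) : Int) := by push_cast; ring
    have harg2 : (j : Int) + ((m + 1 : Nat) : Int) = ((j + 1 : Nat) : Int) + (m : Int) := by push_cast; ring
    rw [hgc, harg, harg2]
    simpa [show j + 1 + m = j + (m + 1) from by omega] using this

lemma pvMain (s : String) (k : Int) (hk1 : 1 ≤ k) (hkn : k.toNat ≤ s.toList.length) :
    ∀ (m : Nat), ∀ (i : Nat) (cnt : PySem.Dict Char Int) (distinct : Int)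
      (seen : PySem.Set String) (res : List String),
    1 ≤ i →
    (i : Int) + (m : Int) = (s.toList.length : Int) - k + 1 →
    (∀ c, cnt.getD c 0 = ((pvWin s.toList (i - 1) k.toNat).count c : Int)) →
    distinct = ((pvWin s.toList (i - 1) k.toNat).toFinset.card : Int) →
    (∀ w, w ∈ seen ↔ w ∈ res) →
    size_k_go s ((s.toList.length : Int)) k (PySem.List.pyRange (i : Int) ((s.toList.length : Int)) 1) res
      = size_k_alt_go s k (PySem.List.pyRange (i : Int) ((s.toList.length : Int) - k + 1) 1) cnt distinct seen res := by
  intro m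
  induction m with
  | zero =>
    intro i cnt distinct seen res hi him hc hd hs
    rw [PySem.List.pyRange_one_eq_nil (show (s.toList.length : Int) - k + 1 ≤ (i : Int) by omega)]
    simp only [size_k_alt_go]
    by_cases hin : (i : Int) < (s.toList.length : Int)
    · rw [PySem.List.pyRange_one_cons hin]
      simp only [size_k_go]
      rw [if_pos (show (i : Int) + k > (s.toList.length : Int) by omega)]
    · rw [PySem.List.pyRange_one_eq_nil (by omega)]
      simp only [size_k_go]
  | succ m ih =>
    intro i cnt distinct seen res hi him hc hd hs
    have hnk : (i : Int) + k ≤ (s.toList.length : Int) := by push_cast at him ⊢; omega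
    have hiltn : (i : Int) < (s.toList.length : Int) := by omega
    have hilt : (i : Int) < (s.toList.length : Int) - k + 1 := by push_cast at him ⊢; omega
    rw [PySem.List.pyRange_one_cons hiltn, PySem.List.pyRange_one_cons hilt]
    simp only [size_k_go, size_k_alt_go]
    rw [if_neg (show ¬ ((i : Int) + k > (s.toList.length : Int)) by omega)]
    rw [if_pos (show (i : Int) > 0 by omega)]
    have hknn : k.toNat ≥ 1 := by omega
    have hwinlen : i - 1 + k.toNat ≤ s.toList.length := by omega
    have hwinlen2 : i + k.toNat ≤ s.toList.length := by omega
    have hjlt : i - 1 < s.toList.length := by omega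
    have hclt : i + k.toNat - 1 < s.toList.length := by omega
    -- the two indexed characters
    have ho : PySem.List.pyGetD s.toList ((i : Int) - 1) ' ' = s.toList[i - 1] := by
      rw [PySem.List.pyGetD_eq_getElem _ _ (by omega) (by push_cast; omega)]
      congr 1
      omega
    have hcc : PySem.List.pyGetD s.toList ((i : Int) + k - 1) ' ' = s.toList[i + k.toNat - 1] := by
      rw [PySem.List.pyGetD_eq_getElem _ _ (by omega) (by push_cast; omega)]
      congr 1
      omega
    rw [ho, hcc]
    -- window decompositions
    have hwc : pvWin s.toList (i - 1) k.toNat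
        = s.toList[i - 1] :: pvWin s.toList i (k.toNat - 1) := by
      have := pvWinCons s.toList (i - 1) k.toNat hknn hwinlen
      rwa [show i - 1 + 1 = i from by omega] at this
    have hws : pvWin s.toList i k.toNat
        = pvWin s.toList i (k.toNat - 1) ++ [s.toList[i + k.toNat - 1]] :=
      pvWinSnoc s.toList i k.toNat hknn hwinlen2
    -- counter facts
    have hv : cnt.getD s.toList[i - 1] 0 - 1
        = ((pvWin s.toList i (k.toNat - 1)).count s.toList[i - 1] : Int) := by
      rw [hc, hwc, List.count_cons_self]
      push_cast
      ring
    have hv2 : (cnt.insert s.toList[i - 1] (cnt.getD s.toList[i - 1] 0 - 1)).getD s.toList[i + k.toNat - 1] 0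
        = ((pvWin s.toList i (k.toNat - 1)).count s.toList[i + k.toNat - 1] : Int) := by
      rw [PySem.Dict.getD_insert]
      split_ifs with h
      · rw [hv, h]
      · rw [hc, hwc, List.count_cons]; simp [Ne.symm h]
    have hc2 : ∀ c, ((cnt.insert s.toList[i - 1] (cnt.getD s.toList[i - 1] 0 - 1)).insert
          s.toList[i + k.toNat - 1]
          ((cnt.insert s.toList[i - 1] (cnt.getD s.toList[i - 1] 0 - 1)).getD s.toList[i + k.toNat - 1] 0 + 1)).getD c 0
        = ((pvWin s.toList (i + 1 - 1) k.toNat).count c : Int) := by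
      intro c
      rw [show i + 1 - 1 = i from by omega, hws]
      rw [PySem.Dict.getD_insert, hv2]
      rw [pvCountSnoc]
      split_ifs with h
      · subst h; push_cast; ring
      · rw [PySem.Dict.getD_insert]
        split_ifs with h2
        · rw [hv, h2]; simp
        · rw [hc, hwc, List.count_cons]; simp [Ne.symm h2]
    -- distinct facts
    have hd1 : (if cnt.getD s.toList[i - 1] 0 - 1 = 0 then distinct - 1 else distinct)
        = ((pvWin s.toList i (k.toNat - 1)).toFinset.card : Int) := by
      rw [hv, hd, hwc, pvCardCons]
      by_cases hm2 : s.toList[i - 1] ∈ pvWin s.toList i (k.toNat - 1)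
      · have hp : 0 < (pvWin s.toList i (k.toNat - 1)).count s.toList[i - 1] :=
          List.count_pos_iff.2 hm2
        rw [if_neg (by push_cast; omega), if_pos hm2]
        push_cast; omega
      · have hz : (pvWin s.toList i (k.toNat - 1)).count s.toList[i - 1] = 0 :=
          List.count_eq_zero.2 hm2
        rw [if_pos (by rw [hz]; norm_num), if_neg hm2]
        push_cast; omega
    have hd2 : (if (cnt.insert s.toList[i - 1] (cnt.getD s.toList[i - 1] 0 - 1)).getD s.toList[i + k.toNat - 1] 0 + 1 = 1
          then (if cnt.getD s.toList[i - 1] 0 - 1 = 0 then distinct - 1 else distinct) + 1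
          else (if cnt.getD s.toList[i - 1] 0 - 1 = 0 then distinct - 1 else distinct))
        = ((pvWin s.toList (i + 1 - 1) k.toNat).toFinset.card : Int) := by
      rw [show i + 1 - 1 = i from by omega, hws, pvCardSnoc, hv2, hd1]
      by_cases hm2 : s.toList[i + k.toNat - 1] ∈ pvWin s.toList i (k.toNat - 1)
      · have hp : 0 < (pvWin s.toList i (k.toNat - 1)).count s.toList[i + k.toNat - 1] :=
          List.count_pos_iff.2 hm2
        rw [if_neg (by push_cast; omega), if_pos hm2]
        push_cast; omega
      · have hz : (pvWin s.toList i (k.toNat - 1)).count s.toList[i + k.toNat - 1] = 0 :=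
          List.count_eq_zero.2 hm2
        rw [if_pos (by rw [hz]; norm_num), if_neg hm2]
        push_cast; omega
    -- the substring of this step
    have hsub : (PySem.Str.slice s (some (i : Int)) (some ((i : Int) + k))).toList
        = pvWin s.toList i k.toNat := by
      rw [pvSubToList s (i : Int) k (by omega) (by omega)]
      simp
    have hlenset : (PySem.Set.len (PySem.Set.ofList
          (PySem.Str.slice s (some (i : Int)) (some ((i : Int) + k))).toList) : Int)
        = ((pvWin s.toList i k.toNat).toFinset.card : Int) := by
      rw [hsub, pvSetLen]
    have hcast : ((i : Int) + 1) = ((i + 1 : Nat) : Int) := by push_cast; ring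
    have hhim : ((i + 1 : Nat) : Int) + (m : Int) = (s.toList.length : Int) - k + 1 := by
      push_cast at him ⊢; omega
    -- case split on the condition and on dedup
    by_cases hdk : ((pvWin s.toList i k.toNat).toFinset.card : Int) = k
    · by_cases hmem : (PySem.Str.slice s (some (i : Int)) (some ((i : Int) + k))) ∈ res
      · rw [if_neg (by rw [hlenset]; tauto), if_pos (by rw [hd2]; rw [show i + 1 - 1 = i from by omega]; exact hdk)]
        rw [if_pos ((hs _).2 hmem)]
        rw [hcast]
        exact ih (i + 1) _ _ _ _ (by omega) hhim hc2 hd2 hs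
      · rw [if_pos ⟨hmem, by rw [hlenset]; exact hdk⟩,
          if_pos (by rw [hd2]; rw [show i + 1 - 1 = i from by omega]; exact hdk)]
        rw [if_neg (fun hwseen => hmem ((hs _).1 hwseen))]
        rw [hcast]
        refine ih (i + 1) _ _ _ _ (by omega) hhim hc2 hd2 ?_
        intro w
        rw [PySem.Set.mem_add]
        simp only [List.mem_append, List.mem_singleton]
        exact or_congr (hs w) Iff.rfl
    · rw [if_neg (by rw [hlenset]; tauto),
        if_neg (by rw [hd2, show i + 1 - 1 = i from by omega]; exact hdk)]
      rw [hcast]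
      exact ih (i + 1) _ _ _ _ (by omega) hhim hc2 hd2 hs

lemma pvANeg (s : String) (k : Int) (hk : k < 0) :
    ∀ (idxs : List Int) (res : List String),
    (∀ i ∈ idxs, i + k ≤ (s.toList.length : Int)) →
    size_k_go s ((s.toList.length : Int)) k idxs res = res := by
  intro idxs
  induction idxs with
  | nil => intro res _; simp only [size_k_go]
  | cons i rest ih =>
    intro res hb
    simp only [size_k_go]
    rw [if_neg (by have := hb i (by simp); omega)]
    rw [if_neg (by
      rintro ⟨-, h2⟩
      rw [pvSetLen] at h2
      omega)]
    exact ih res (fun j hj => hb j (by simp [hj]))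

lemma pvSliceEmpty (s : String) (i : Int) (h : 0 ≤ i) :
    PySem.Str.slice s (some i) (some (i + 0)) = "" := by
  have h1 : (PySem.Str.slice s (some i) (some (i + 0))).toList = [] := by
    rw [pvSubToList s i 0 h le_rfl]
    unfold pvWin
    simp
  have := congrArg String.mk h1
  simpa using this

lemma pvAZeroRest (s : String) :
    ∀ (idxs : List Int) (res : List String),
    "" ∈ res →
    (∀ i ∈ idxs, 0 ≤ i ∧ i ≤ (s.toList.length : Int)) →
    size_k_go s ((s.toList.length : Int)) 0 idxs res = res := by
  intro idxs
  induction idxs with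
  | nil => intro res _ _; simp only [size_k_go]
  | cons i rest ih =>
    intro res hres hb
    simp only [size_k_go]
    rw [if_neg (by have := hb i (by simp); omega)]
    rw [if_neg (by
      rintro ⟨h1, -⟩
      exact h1 (by rw [pvSliceEmpty s i (hb i (by simp)).1]; exact hres))]
    exact ih res hres (fun j hj => hb j (by simp [hj]))
-- ===== VERDICT (by name: the statement is the Claim_ definition above) =====
theorem size_k_spec : Claim_equal_size_k := by
  unfold Claim_equal_size_k Spec_size_k
  intro s k _
  simp only [size_k, size_k_alt, PySem.Str.len_eq]
  by_cases h1 : k < 0 ∨ k > (s.toList.length : Int)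
  · rw [if_pos h1]
    rcases h1 with hneg | hbig
    · exact pvANeg s k hneg _ [] (by
        intro i hi
        rw [PySem.List.mem_pyRange_one] at hi
        omega)
    · by_cases hn : s.toList.length = 0
      · rw [PySem.List.pyRange_one_eq_nil (by omega)]
        simp only [size_k_go]
      · rw [PySem.List.pyRange_one_cons (by omega)]
        simp only [size_k_go]
        rw [if_pos (by omega)]
  · rw [if_neg h1]
    push_neg at h1
    obtain ⟨hk0, hkn⟩ := h1
    by_cases h2 : k = 0
    · subst h2
      rw [if_pos rfl]
      by_cases hn : s.toList.length = 0
      · rw [if_neg (by omega), PySem.List.pyRange_one_eq_nil (by omega)]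
        simp only [size_k_go]
      · rw [if_pos (show (s.toList.length : Int) ≠ 0 by omega)]
        rw [PySem.List.pyRange_one_cons (by omega)]
        simp only [size_k_go]
        rw [if_neg (by omega)]
        rw [if_pos (show (PySem.Str.slice s (some (0 : Int)) (some ((0 : Int) + 0)))
              ∉ ([] : List String) ∧
              ((PySem.Set.len (PySem.Set.ofList
                (PySem.Str.slice s (some (0 : Int)) (some ((0 : Int) + 0))).toList) : Int) = 0) from
          ⟨List.not_mem_nil, by rw [pvSliceEmpty s 0 le_rfl]; simp⟩)]
        rw [pvSliceEmpty s 0 le_rfl]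
        refine pvAZeroRest s _ _ (by simp) ?_
        intro i hi
        rw [PySem.List.mem_pyRange_one] at hi
        omega
    · -- 1 ≤ k ≤ n
      rw [if_neg h2]
      have hk1 : 1 ≤ k := by omega
      have hktn : k.toNat ≤ s.toList.length := by omega
      have hinit := pvInit s.toList k.toNat 0 PySem.Dict.empty 0 (by omega)
        (by intro c; simp) (by simp)
      rw [show ((0 : Nat) : Int) = (0 : Int) by norm_num] at hinit
      rw [show (0 : Int) + ((k.toNat : Nat) : Int) = k by omega] at hinit
      simp only [Nat.zero_add] at hinit
      -- first iteration (i = 0)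
      have hn1 : (0 : Int) < (s.toList.length : Int) := by omega
      have hn2 : (0 : Int) < (s.toList.length : Int) - k + 1 := by omega
      rw [PySem.List.pyRange_one_cons hn1, PySem.List.pyRange_one_cons hn2]
      simp only [size_k_go, size_k_alt_go]
      rw [if_neg (show ¬ ((0 : Int) + k > (s.toList.length : Int)) by omega)]
      rw [if_neg (show ¬ ((0 : Int) > 0) by norm_num)]
      have hwin0 : pvWin s.toList 0 k.toNat = s.toList.take k.toNat := by
        unfold pvWin; rw [List.drop_zero]
      have hsub0 : (PySem.Str.slice s (some (0 : Int)) (some ((0 : Int) + k))).toList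
          = pvWin s.toList 0 k.toNat := by
        rw [pvSubToList s 0 k le_rfl (by omega)]
        simp
      have hL : (PySem.Set.len (PySem.Set.ofList
            (PySem.Str.slice s (some (0 : Int)) (some ((0 : Int) + k))).toList) : Int)
          = ((pvWin s.toList 0 k.toNat).toFinset.card : Int) := by
        rw [hsub0, pvSetLen]
      have hc0 : ∀ c, (size_k_alt_init s.toList (PySem.List.pyRange 0 k 1)
            (PySem.Dict.empty, 0)).1.getD c 0
          = ((pvWin s.toList 0 k.toNat).count c : Int) := by
        intro c; rw [hwin0]; exact hinit.1 c
      have hd0 : (size_k_alt_init s.toList (PySem.List.pyRange 0 k 1)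
            (PySem.Dict.empty, 0)).2
          = ((pvWin s.toList 0 k.toNat).toFinset.card : Int) := by
        rw [hwin0]; exact hinit.2
      have hcast01 : ((0 : Int) + 1) = ((1 : Nat) : Int) := by norm_num
      have hm1 : ((1 : Nat) : Int) + ((s.toList.length - k.toNat : Nat) : Int)
          = (s.toList.length : Int) - k + 1 := by push_cast; omega
      by_cases hdk : ((pvWin s.toList 0 k.toNat).toFinset.card : Int) = k
      · rw [if_pos (show (PySem.Str.slice s (some (0 : Int)) (some ((0 : Int) + k)))
              ∉ ([] : List String) ∧
              ((PySem.Set.len (PySem.Set.ofList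
                (PySem.Str.slice s (some (0 : Int)) (some ((0 : Int) + k))).toList) : Int) = k) from
          ⟨List.not_mem_nil, by rw [hL]; exact hdk⟩)]
        rw [if_pos (show (size_k_alt_init s.toList (PySem.List.pyRange 0 k 1)
              (PySem.Dict.empty, 0)).2 = k from by rw [hd0]; exact hdk)]
        rw [if_neg (show ¬ ((PySem.Str.slice s (some (0 : Int)) (some ((0 : Int) + k)))
              ∈ PySem.Set.empty) from by simp [PySem.Set.empty])]
        rw [hcast01]
        exact pvMain s k hk1 hktn (s.toList.length - k.toNat) 1 _ _ _ _ (le_refl 1) hm1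
          (by simpa using hc0) (by simpa using hd0) (fun w => by
            rw [PySem.Set.mem_add]
            simp [PySem.Set.empty])
      · rw [if_neg (show ¬ ((PySem.Str.slice s (some (0 : Int)) (some ((0 : Int) + k)))
              ∉ ([] : List String) ∧
              ((PySem.Set.len (PySem.Set.ofList
                (PySem.Str.slice s (some (0 : Int)) (some ((0 : Int) + k))).toList) : Int) = k)) from by
          rw [hL]; tauto)]
        rw [if_neg (show ¬ ((size_k_alt_init s.toList (PySem.List.pyRange 0 k 1)
              (PySem.Dict.empty, 0)).2 = k) from by rw [hd0]; exact hdk)]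
        rw [hcast01]
        exact pvMain s k hk1 hktn (s.toList.length - k.toNat) 1 _ _ _ _ (le_refl 1) hm1
          (by simpa using hc0) (by simpa using hd0) (fun w => by simp [PySem.Set.empty])
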